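-- pv_equiv track=rewrite | github.com/carlzimmerman/zimmerman-formula | extended_research/biotech/z2_protein_folder_v9.py | _detect_helix_caps
-- ===== SOURCE A (Python) =====
-- from typing import Dict, List, Tuple
--
-- N_CAP_PREFERENCES = {
--     'N': 1.5, 'D': 1.4, 'S': 1.3, 'T': 1.2, 'G': 0.6, 'P': 0.3
-- }
--
-- def _detect_helix_caps(sequence: str, ss: List[str]) -> List[str]:
--     """Apply helix capping rules."""
--     n = len(sequence)
--     result = ss.copy()
--
--     # Find helix boundaries and check capping
--     i = 0
--     while i < n:
--         if result[i] == 'H':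
--             # Find helix end
--             j = i
--             while j < n and result[j] == 'H':
--                 j += 1
--             helix_len = j - i
--
--             # N-cap: check if good capping residue before helix
--             if i > 0:
--                 ncap = sequence[i-1]
--                 if ncap in N_CAP_PREFERENCES and N_CAP_PREFERENCES[ncap] > 1.0:
--                     pass  # Good N-cap, keep helix
--                 elif ncap == 'P' and helix_len < 5:
--                     # Proline before short helix - might not be a real helix
--                     for k in range(i, j):
--                         result[k] = 'C'
--
--             # C-cap: check if helix ends with proper residue
--             if j < n:
--                 ccap = sequence[j-1]  # Last helix residue
--                 if ccap in ['G'] and helix_len >= 4: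
--                     pass  # Glycine can be C-cap
--
--             i = j
--         else:
--             i += 1
--
--     return result
-- ===== SOURCE B (Python) =====
-- def _runlens(items):
--     """Running count of consecutive 'H' entries ending at each position."""
--     out = []
--     c = 0
--     for x in items:
--         c = c + 1 if x == 'H' else 0
--         out.append(c)
--     return out
--
-- def _detect_helix_caps(sequence, ss):
--     """Pointwise helix capping: two scan passes give, for each position, the
--     H-run lengths before/after it; a final map decides each position alone."""
--     n = len(sequence)
--     head = ss[:n]
--     pre = _runlens(head)                      # H-run length ending here
--     suf = _runlens(reversed(head))[::-1]      # H-run length starting here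
--     out = []
--     for k, x in enumerate(head):
--         p = pre[k]
--         if x == 'H' and p <= k and sequence[k - p] == 'P' and p + suf[k] - 1 < 5:
--             out.append('C')
--         else:
--             out.append(x)
--     return out + ss[n:]
-- ===== Notes on version B (the rewrite author's own statement) =====
-- stated objective: alternative
-- what changed: B drops A's run-finding while-loops with index jumps and in-place mutation: two scan passes (forward and backward) compute for every position the length of the consecutive-H stretch ending/starting there, and a final pointwise map rewrites a position to 'C' exactly when its own run data show a short (<5) helix preceded by 'P'.
import Mathlib
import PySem

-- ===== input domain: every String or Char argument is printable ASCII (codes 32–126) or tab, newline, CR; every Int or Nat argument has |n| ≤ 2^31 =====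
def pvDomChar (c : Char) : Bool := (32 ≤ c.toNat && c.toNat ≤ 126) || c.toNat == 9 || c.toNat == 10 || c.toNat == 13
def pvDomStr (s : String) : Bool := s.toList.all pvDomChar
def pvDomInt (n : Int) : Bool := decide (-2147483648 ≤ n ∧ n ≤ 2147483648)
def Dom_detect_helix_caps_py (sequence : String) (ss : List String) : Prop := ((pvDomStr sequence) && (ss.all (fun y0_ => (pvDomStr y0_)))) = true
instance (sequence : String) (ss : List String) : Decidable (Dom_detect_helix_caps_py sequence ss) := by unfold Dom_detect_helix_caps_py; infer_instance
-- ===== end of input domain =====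

-- B replaces A's while/index-jump in-place run scan by two scan passes (per-position H-run lengths) and a pointwise map; alternative decomposition, same O(n) cost. A mutates only its private copy of ss, so return-value equivalence is the whole story.


-- ===== PORT A =====
-- N_CAP_PREFERENCES: exact rational values of the float literals (all comparisons with 1.0 are exact)
def nCapPref (c : Char) : Option ℚ :=
  if c = 'N' then some (3/2) else if c = 'D' then some (7/5)
  else if c = 'S' then some (13/10) else if c = 'T' then some (6/5)
  else if c = 'G' then some (3/5) else if c = 'P' then some (3/10) else none

-- inner `while j < n and result[j] == 'H'` loop
def findJA (result : List String) (n j : Nat) : Nat :=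
  if j < n ∧ result.getD j "" = "H" then findJA result n (j+1) else j
termination_by n - j
decreasing_by omega

theorem findJA_ge (result : List String) (n j : Nat) : j ≤ findJA result n j := by
  fun_induction findJA with
  | case1 _ _ ih => omega
  | case2 => omega

theorem findJA_gt (result : List String) (n i : Nat) (h1 : i < n)
    (h2 : result.getD i "" = "H") : i < findJA result n i := by
  have := findJA_ge result n (i+1)
  rw [findJA, if_pos ⟨h1, h2⟩]
  omega

-- outer `while i < n` loop; indices reached are in range under Pre_, so result[i] is ported as getD
def goA (seq : List Char) (n : Nat) (result : List String) (i : Nat) : List String :=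
  if hi : i < n then
    if hH : result.getD i "" = "H" then
      let j := findJA result n i
      let helix_len := j - i
      let result' :=
        if 0 < i then
          let ncap := seq.getD (i-1) ' '
          if (nCapPref ncap).isSome ∧ (nCapPref ncap).getD 0 > 1 then
            result  -- pass: good N-cap
          else if ncap = 'P' ∧ helix_len < 5 then
            (List.range helix_len).foldl (fun r t => r.set (i+t) "C") result
          else result
        else result
      -- A's C-cap check (`if j < n: ccap = sequence[j-1]; if ccap in ['G'] ...: pass`) only ever executes `pass`; it is a no-op
      goA seq n result' j
    else goA seq n result (i+1)
  else result
termination_by n - i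
decreasing_by
  · have := findJA_gt result n i hi hH
    omega
  · omega

def detect_helix_caps_py (sequence : String) (ss : List String) : List String :=
  goA sequence.toList sequence.toList.length ss 0

-- ===== PORT B =====
-- _runlens: running count of consecutive "H" entries (the loop's carry c becomes the recursion's argument)
def preAux (c : Nat) (l : List String) : List Nat :=
  match l with
  | [] => []
  | x :: xs =>
    let c' := if x = "H" then c + 1 else 0
    c' :: preAux c' xs

-- the final `for k, x in enumerate(head)` loop, walking head/pre/suf in parallel
def mapCaps (seq : List Char) (k : Nat) : List String → List Nat → List Nat → List String
  | x :: xs, p :: ps, s :: qs =>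
    (if x = "H" ∧ p ≤ k ∧ seq.getD (k - p) ' ' = 'P' ∧ p + s - 1 < 5 then "C" else x)
      :: mapCaps seq (k+1) xs ps qs
  | _, _, _ => []

def detect_helix_caps_py_alt (sequence : String) (ss : List String) : List String :=
  let seq := sequence.toList
  let n := seq.length
  let head := ss.take n
  let pre := preAux 0 head
  let suf := (preAux 0 head.reverse).reverse
  mapCaps seq 0 head pre suf ++ ss.drop n

-- ===== PRECONDITION & SPEC =====
-- A indexes result[i] for every i < len(sequence); when ss is shorter it raises IndexError, so those inputs are excluded.
def Pre_detect_helix_caps_py (sequence : String) (ss : List String) : Prop :=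
  sequence.toList.length ≤ ss.length
instance (sequence : String) (ss : List String) : Decidable (Pre_detect_helix_caps_py sequence ss) := by
  unfold Pre_detect_helix_caps_py; infer_instance

def pvWitness_detect_helix_caps_py : String × List String := ("PH", ["C", "H"])

def Spec_detect_helix_caps_py (sequence : String) (ss : List String) (out : List String) : Prop := out = detect_helix_caps_py_alt sequence ss
instance (sequence : String) (ss : List String) (out : List String) : Decidable (Spec_detect_helix_caps_py sequence ss out) := by unfold Spec_detect_helix_caps_py; infer_instance

-- ===== CLAIM (what is proved, stated in full; the proofs are below) =====
def Claim_equal_detect_helix_caps_py : Prop := ∀ (sequence : String) (ss : List String), Dom_detect_helix_caps_py sequence ss → Pre_detect_helix_caps_py sequence ss → Spec_detect_helix_caps_py sequence ss (detect_helix_caps_py sequence ss)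


-- ===== LEMMAS AND PROOFS =====

theorem findJA_le (result : List String) (n j : Nat) (h : j ≤ n) : findJA result n j ≤ n := by
  fun_induction findJA with
  | case1 _ hc ih => exact ih (by omega)
  | case2 => omega

theorem findJA_all (result : List String) (n j : Nat) :
    ∀ k, j ≤ k → k < findJA result n j → result.getD k "" = "H" := by
  fun_induction findJA with
  | case1 j hc ih =>
    intro k hk1 hk2
    rcases Nat.eq_or_lt_of_le hk1 with h | h
    · exact h ▸ hc.2
    · exact ih k h hk2
  | case2 j hc =>
    intro k hk1 hk2; omega

theorem findJA_end (result : List String) (n j : Nat) (h : findJA result n j < n) :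
    result.getD (findJA result n j) "" ≠ "H" := by
  fun_induction findJA with
  | case1 _ hc ih => exact ih h
  | case2 j hc =>
    intro hH; exact hc ⟨h, hH⟩

-- proof-side run view of a list (itertools-groupby-like), used only to relate the two ports
def groupRunsB (l : List String) : List (String × Nat) :=
  match l with
  | [] => []
  | x :: xs =>
    match groupRunsB xs with
    | [] => [(x, 1)]
    | (y, k) :: rest => if x = y then (x, k+1) :: rest else (x, 1) :: (y, k) :: rest

def emitB (seq : List Char) (rs : List (String × Nat)) (pos : Nat) : List String :=
  match rs with
  | [] => []
  | (c, L) :: rest =>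
    (if c = "H" ∧ 0 < pos ∧ seq.getD (pos-1) ' ' = 'P' ∧ L < 5
     then List.replicate L "C" else List.replicate L c) ++ emitB seq rest (pos + L)

theorem groupRunsB_cons (x : String) (xs : List String) :
    groupRunsB (x :: xs) = (match groupRunsB xs with
      | [] => [(x, 1)]
      | (y, k) :: rest => if x = y then (x, k+1) :: rest else (x, 1) :: (y, k) :: rest) := rfl

theorem groupRunsB_head (x : String) (xs : List String) :
    ∃ k rest, groupRunsB (x :: xs) = (x, k) :: rest := by
  rw [groupRunsB_cons]
  rcases h : groupRunsB xs with _ | ⟨⟨y, k⟩, rest⟩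
  · exact ⟨1, [], rfl⟩
  · by_cases hxy : x = y
    · subst hxy; exact ⟨k+1, rest, by simp⟩
    · exact ⟨1, (y, k) :: rest, by simp [hxy]⟩

theorem groupRunsB_replicate (c : String) (L : Nat) (tl : List String)
    (hL : 0 < L) (htl : tl.head? ≠ some c) :
    groupRunsB (List.replicate L c ++ tl) = (c, L) :: groupRunsB tl := by
  induction L with
  | zero => omega
  | succ L ih =>
    by_cases hL0 : 0 < L
    · rw [List.replicate_succ, List.cons_append, groupRunsB_cons, ih hL0]
      simp
    · have : L = 0 := by omega
      subst this
      simp only [List.replicate_succ, List.replicate_zero, List.nil_append, List.cons_append]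
      rcases tl with _ | ⟨z, zs⟩
      · simp [groupRunsB]
      · have hz : z ≠ c := by simpa using htl
        have hcz : c ≠ z := fun h => hz h.symm
        obtain ⟨k, rest, hgr⟩ := groupRunsB_head z zs
        rw [groupRunsB_cons, hgr]
        simp [hcz]

-- the in-place `for k in range(i, j): result[k] = 'C'` has this closed form
theorem setRange_eq (r : List String) (i m : Nat) (h : i + m ≤ r.length) :
    (List.range m).foldl (fun r t => r.set (i+t) "C") r
      = r.take i ++ List.replicate m "C" ++ r.drop (i+m) := by
  induction m with
  | zero => simp [List.take_append_drop]
  | succ m ih =>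
    rw [List.range_succ, List.foldl_append, ih (by omega)]
    simp only [List.foldl_cons, List.foldl_nil]
    have him : i + m < r.length := by omega
    have hti : (List.take i r).length = i := by
      rw [List.length_take]; omega
    rw [List.append_assoc, List.set_append_right _ _ (by rw [hti]; omega), hti,
        show i + m - i = m from by omega,
        List.set_append_right _ _ (by simp), List.length_replicate,
        show m - m = 0 from by omega,
        List.drop_eq_getElem_cons him, List.set_cons_zero]
    simp [List.replicate_succ', List.append_assoc,
      show i + (m+1) = i + m + 1 from by omega]

-- segment of all-"H" splits off as a replicate block
theorem segment_split (r : List String) (i j n : Nat)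
    (hij : i ≤ j) (hjn : j ≤ n) (hn : n ≤ r.length)
    (hall : ∀ k, i ≤ k → k < j → r.getD k "" = "H") :
    (r.drop i).take (n - i) = List.replicate (j - i) "H" ++ (r.drop j).take (n - j) := by
  revert hjn hall
  induction j, hij using Nat.le_induction with
  | base => intro _ _; simp
  | succ j' hij' ih =>
    intro hjn hall
    have h1 : ∀ k, i ≤ k → k < j' → r.getD k "" = "H" := fun k hk1 hk2 => hall k hk1 (by omega)
    rw [ih (by omega) h1]
    have hj' : j' < r.length := by omega
    rw [List.drop_eq_getElem_cons hj']
    have hH : r[j'] = "H" := by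
      have := hall j' (by omega) (by omega)
      rwa [List.getD_eq_getElem r "" hj'] at this
    have hnj : n - j' = (n - (j'+1)) + 1 := by omega
    rw [hnj, List.take_succ_cons, hH]
    have : j' + 1 - i = (j' - i) + 1 := by omega
    rw [this, List.replicate_succ']
    simp

theorem emitB_cons_ne (seq : List Char) (c : String) (tl : List String) (pos : Nat)
    (hc : c ≠ "H") :
    emitB seq (groupRunsB (c :: tl)) pos = c :: emitB seq (groupRunsB tl) (pos + 1) := by
  rcases tl with _ | ⟨z, zs⟩
  · simp [groupRunsB, emitB, hc]
  · obtain ⟨k, rest, hgr⟩ := groupRunsB_head z zs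
    by_cases hcz : c = z
    · subst hcz
      have hred : groupRunsB (c :: c :: zs) = (c, k+1) :: rest := by
        rw [groupRunsB_cons, hgr]; simp
      rw [hred, hgr]
      simp only [emitB]
      rw [show pos + (k+1) = pos + 1 + k by omega]
      simp [hc, List.replicate_succ]
    · have hred : groupRunsB (c :: z :: zs) = (c, 1) :: (z, k) :: rest := by
        rw [groupRunsB_cons, hgr]; simp [hcz]
      rw [hred, hgr]
      simp only [emitB]
      simp [hc]

-- main loop invariant: goA computes the take/emit/drop closed form
theorem goA_eq (seq : List Char) (n : Nat) :
    ∀ m (r : List String) (i : Nat), m = n - i → i ≤ n → n ≤ r.length →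
    goA seq n r i = r.take i ++ emitB seq (groupRunsB ((r.drop i).take (n - i))) i ++ r.drop n := by
  intro m
  induction m using Nat.strong_induction_on with
  | _ m ih =>
    intro r i hm hin hnr
    by_cases hi : i < n
    · by_cases hH : r.getD i "" = "H"
      · -- helix run case
        set j := findJA r n i with hj
        have hji : i < j := findJA_gt r n i hi hH
        have hjn : j ≤ n := findJA_le r n i (by omega)
        have hall : ∀ k, i ≤ k → k < j → r.getD k "" = "H" := findJA_all r n i
        set L := j - i with hL
        have hseg : (r.drop i).take (n - i)
            = List.replicate L "H" ++ (r.drop j).take (n - j) :=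
          segment_split r i j n (by omega) hjn hnr hall
        have htlhead : ((r.drop j).take (n - j)).head? ≠ some "H" := by
          by_cases hjn' : j < n
          · have hjr : j < r.length := by omega
            rw [List.drop_eq_getElem_cons hjr]
            have hnjpos : n - j = (n - (j+1)) + 1 := by omega
            rw [hnjpos, List.take_succ_cons]
            have := findJA_end r n i hjn'
            rw [List.getD_eq_getElem r "" hjr] at this
            simpa using this
          · have : n - j = 0 := by omega
            simp [this]
        have hgr : groupRunsB ((r.drop i).take (n - i))
            = ("H", L) :: groupRunsB ((r.drop j).take (n - j)) := by
          rw [hseg]; exact groupRunsB_replicate "H" L _ (by omega) htlhead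
        have hrtakeL : (r.drop i).take L = List.replicate L "H" := by
          have := congrArg (List.take L) hseg
          rw [List.take_take] at this
          rw [Nat.min_eq_left (by omega)] at this
          rw [this]
          simp
        -- result' as a closed form
        have hres : goA seq n r i =
            goA seq n (if 0 < i ∧ seq.getD (i-1) ' ' = 'P' ∧ L < 5 then
              r.take i ++ List.replicate L "C" ++ r.drop j else r) j := by
          rw [goA]
          simp only [dif_pos hi, dif_pos hH, ← hj, ← hL]
          congr 1
          by_cases h0 : 0 < i
          · simp only [if_pos h0]
            by_cases hP : seq.getD (i-1) ' ' = 'P'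
            · rw [hP]
              have : ¬ ((nCapPref 'P').isSome ∧ (nCapPref 'P').getD 0 > 1) := by
                rw [show nCapPref 'P' = some (3/10) from rfl]
                norm_num
              rw [if_neg this]
              by_cases h5 : L < 5
              · rw [if_pos (show ('P' : Char) = 'P' ∧ L < 5 from ⟨rfl, h5⟩)]
                rw [if_pos (show 0 < i ∧ ('P' : Char) = 'P' ∧ L < 5 from ⟨h0, rfl, h5⟩)]
                rw [setRange_eq r i L (by rw [hL]; omega)]
                congr 2
                rw [hL]; omega
              · rw [if_neg (show ¬(('P' : Char) = 'P' ∧ L < 5) from fun h => h5 h.2),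
                    if_neg (show ¬(0 < i ∧ ('P' : Char) = 'P' ∧ L < 5) from fun h => h5 h.2.2)]
            · rw [if_neg (show ¬(0 < i ∧ seq.getD (i-1) ' ' = 'P' ∧ L < 5) from fun h => hP h.2.1)]
              split
              · rfl
              · exact if_neg (fun h => hP h.1)
          · rw [if_neg h0,
                if_neg (show ¬(0 < i ∧ seq.getD (i-1) ' ' = 'P' ∧ L < 5) from fun h => h0 h.1)]
        rw [hres]
        by_cases hc : 0 < i ∧ seq.getD (i-1) ' ' = 'P' ∧ L < 5
        · rw [if_pos hc, List.append_assoc]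
          have hleni : (r.take i).length = i := by rw [List.length_take]; omega
          have hti : (r.take i).length ≤ j := by rw [hleni]; omega
          have hlen' : (r.take i ++ (List.replicate L "C" ++ r.drop j)).length = r.length := by
            simp only [List.length_append, hleni, List.length_replicate, List.length_drop]
            rw [hL]; omega
          have htake' : (r.take i ++ (List.replicate L "C" ++ r.drop j)).take j
              = r.take i ++ List.replicate L "C" := by
            rw [List.take_append, List.take_of_length_le hti, hleni,
                show j - i = L from hL.symm, List.take_left' (by simp)]
          have hdrop' : (r.take i ++ (List.replicate L "C" ++ r.drop j)).drop j = r.drop j := by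
            rw [List.drop_append, List.drop_eq_nil_of_le hti, hleni,
                show j - i = L from hL.symm, List.drop_left' (by simp), List.nil_append]
          have hdropn' : (r.take i ++ (List.replicate L "C" ++ r.drop j)).drop n = r.drop n := by
            have h1 := congrArg (List.drop (n - j)) hdrop'
            rw [List.drop_drop, List.drop_drop, show j + (n - j) = n from by omega] at h1
            exact h1
          rw [ih (n - j) (by omega) _ j rfl hjn (by rw [hlen']; exact hnr)]
          rw [htake', hdrop', hdropn', hgr]
          simp only [emitB]
          obtain ⟨hc1, hc2, hc3⟩ := hc
          rw [List.getD_eq_getElem?_getD] at hc2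
          simp [hc1, hc2, hc3, show i + L = j from by rw [hL]; omega, List.append_assoc]
        · rw [if_neg hc]
          rw [ih (n - j) (by omega) r j rfl hjn hnr]
          have htakej : r.take j = r.take i ++ List.replicate L "H" := by
            rw [show j = i + L from by rw [hL]; omega, List.take_add, hrtakeL]
          rw [htakej, hgr]
          simp only [emitB]
          rw [show i + L = j from by rw [hL]; omega]
          simp only [List.append_assoc]
          congr 2
          rw [if_neg (show ¬(True ∧ 0 < i ∧ seq.getD (i-1) ' ' = 'P' ∧ L < 5) from
                fun h => hc h.2)]
      · -- non-helix element: step by one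
        have hir : i < r.length := by omega
        have hH' : ¬ r[i] = "H" := by rwa [List.getD_eq_getElem r "" hir] at hH
        rw [goA]
        simp only [dif_pos hi]
        rw [dif_neg hH]
        rw [ih (n - (i+1)) (by omega) r (i+1) rfl (by omega) hnr]
        have hcons : (r.drop i).take (n - i) = r.getD i "" :: (r.drop (i+1)).take (n - (i+1)) := by
          rw [List.drop_eq_getElem_cons hir]
          have : n - i = (n - (i+1)) + 1 := by omega
          rw [this, List.take_succ_cons, List.getD_eq_getElem r "" hir]
        rw [hcons, emitB_cons_ne seq _ _ i hH]
        have hstep : List.take (i+1) r = List.take i r ++ [r[i]] := by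
          rw [List.take_add_one, List.getElem?_eq_getElem hir]
          rfl
        rw [List.getD_eq_getElem r "" hir, hstep]
        congr 1
        rw [List.append_assoc, List.singleton_append]
    · have : i = n := by omega
      subst this
      rw [goA]
      simp [groupRunsB, emitB, List.take_append_drop]

-- ===== bridge: port B's scan/map form equals the run/emit closed form =====

theorem preAux_head_ne (c c' : Nat) (tl : List String) (h : tl.head? ≠ some "H") :
    preAux c tl = preAux c' tl := by
  rcases tl with _ | ⟨y, ys⟩
  · rfl
  · have hy : y ≠ "H" := by simpa using h
    simp [preAux, hy]

theorem preAux_append (c : Nat) (a b : List String) :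
    preAux c (a ++ b) = preAux c a ++ preAux ((preAux c a).getLastD c) b := by
  induction a generalizing c with
  | nil => simp [preAux]
  | cons x xs ih =>
    simp only [List.cons_append, preAux, ih, List.cons_append, List.getLastD_cons]

theorem preAux_repl_H (L c : Nat) :
    preAux c (List.replicate L "H") = (List.range L).map (fun t => c + t + 1) := by
  induction L generalizing c with
  | zero => simp [preAux]
  | succ L ih =>
    rw [List.replicate_succ, List.range_succ_eq_map]
    simp only [preAux, List.map_cons, List.map_map, ih]
    rw [if_pos trivial]
    refine List.cons_eq_cons.mpr ⟨by omega, ?_⟩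
    refine List.map_congr_left fun t _ => ?_
    show c + 1 + t + 1 = c + (t + 1) + 1
    omega

theorem preAux_repl_nonH (L c : Nat) (s : String) (hs : s ≠ "H") :
    preAux c (List.replicate L s) = List.replicate L 0 := by
  induction L generalizing c with
  | zero => rfl
  | succ L ih => simp [List.replicate_succ, preAux, hs, ih]

-- per-position H-run length starting here (specification of the reversed scan)
def sufR : List String → List Nat
  | [] => []
  | x :: xs => (if x = "H" then (sufR xs).headD 0 + 1 else 0) :: sufR xs

theorem sufR_eq (l : List String) : (preAux 0 l.reverse).reverse = sufR l := by
  induction l with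
  | nil => rfl
  | cons x xs ih =>
    rw [List.reverse_cons, preAux_append]
    have hone : ∀ w : Nat, preAux w [x] = [if x = "H" then w + 1 else 0] := fun w => rfl
    rw [hone, List.reverse_append, List.reverse_singleton, List.singleton_append, ih, sufR]
    congr 2
    rcases h : preAux 0 xs.reverse with _ | ⟨a, as⟩
    · have : sufR xs = [] := by rw [← ih, h]; rfl
      simp [this]
    · have h1 : (sufR xs).headD 0 = (a :: as).getLastD 0 := by
        rw [← ih, h, List.headD_eq_head?_getD, List.head?_reverse,
            List.getLastD_eq_getLast?]
      rw [h1]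

theorem sufR_headD_ne (tl : List String) (h : tl.head? ≠ some "H") : (sufR tl).headD 0 = 0 := by
  rcases tl with _ | ⟨y, ys⟩
  · rfl
  · have hy : y ≠ "H" := by simpa using h
    simp [sufR, hy]

theorem sufR_append_H (L : Nat) (tl : List String) (h : (sufR tl).headD 0 = 0) :
    sufR (List.replicate L "H" ++ tl) = (List.range L).map (fun t => L - t) ++ sufR tl := by
  induction L with
  | zero => simp
  | succ L ih =>
    rw [List.replicate_succ, List.cons_append, sufR, ih]
    have htail : (List.range (L+1)).map (fun t => L + 1 - t)
        = (L+1) :: (List.range L).map (fun t => L - t) := by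
      rw [List.range_succ_eq_map, List.map_cons, List.map_map]
      congr 1
      refine List.map_congr_left fun t _ => ?_
      simp
    rw [htail, if_pos rfl]
    congr 1
    rcases L with _ | L'
    · simpa using h
    · rw [List.range_succ_eq_map]
      simp

theorem sufR_append_nonH (L : Nat) (s : String) (hs : s ≠ "H") (tl : List String) :
    sufR (List.replicate L s ++ tl) = List.replicate L 0 ++ sufR tl := by
  induction L with
  | zero => simp
  | succ L ih => simp [List.replicate_succ, sufR, hs, ih]

theorem mapCaps_append (seq : List Char) (k : Nat) (a a' : List String)
    (p p' : List Nat) (s s' : List Nat) (hp : p.length = a.length) (hs : s.length = a.length) :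
    mapCaps seq k (a ++ a') (p ++ p') (s ++ s')
      = mapCaps seq k a p s ++ mapCaps seq (k + a.length) a' p' s' := by
  induction a generalizing k p s with
  | nil =>
    have : p = [] := List.eq_nil_of_length_eq_zero (by simpa using hp)
    have hs' : s = [] := List.eq_nil_of_length_eq_zero (by simpa using hs)
    subst this; subst hs'; simp [mapCaps]
  | cons x xs ih =>
    rcases p with _ | ⟨p0, ps⟩
    · simp at hp
    rcases s with _ | ⟨s0, qs⟩
    · simp at hs
    simp only [List.cons_append, mapCaps, List.length_cons]
    rw [ih (k+1) ps qs (by simpa using hp) (by simpa using hs),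
        show k + 1 + xs.length = k + (xs.length + 1) from by omega]

theorem mapCaps_block_H (seq : List Char) (pos : Nat) :
    ∀ m j, mapCaps seq (pos + j) (List.replicate m "H")
      ((List.range m).map (fun t => t + j + 1)) ((List.range m).map (fun t => m - t))
    = List.replicate m (if 0 < pos ∧ seq.getD (pos-1) ' ' = 'P' ∧ j + m < 5 then "C" else "H") := by
  intro m
  induction m with
  | zero => intro j; rfl
  | succ m ih =>
    intro j
    rw [List.replicate_succ, List.range_succ_eq_map]
    simp only [List.map_cons, List.map_map, mapCaps]
    have h2 : (List.range m).map ((fun t => t + j + 1) ∘ (· + 1))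
        = (List.range m).map (fun t => t + (j + 1) + 1) := by
      congr 1; funext t; show t + 1 + j + 1 = t + (j + 1) + 1; omega
    have h3 : (List.range m).map ((fun t => m + 1 - t) ∘ (· + 1))
        = (List.range m).map (fun t => m - t) := by
      congr 1; funext t; show m + 1 - (t + 1) = m - t; omega
    rw [h2, h3, show pos + j + 1 = pos + (j + 1) from by omega, ih (j+1)]
    rw [List.replicate_succ]
    congr 1
    · simp only [Nat.zero_add, Nat.sub_zero]
      by_cases hp : 0 < pos
      · rw [show pos + j - (j + 1) = pos - 1 from by omega]
        by_cases hP : seq.getD (pos - 1) ' ' = 'P'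
        · by_cases h5 : j + (m + 1) < 5
          · rw [if_pos ⟨trivial, by omega, hP, by omega⟩, if_pos ⟨hp, hP, h5⟩]
          · rw [if_neg (by rintro ⟨-, -, -, h⟩; omega), if_neg (by rintro ⟨-, -, h⟩; omega)]
        · rw [if_neg (by rintro ⟨-, -, h, -⟩; exact hP h), if_neg (by rintro ⟨-, h, -⟩; exact hP h)]
      · rw [if_neg (by rintro ⟨-, h, -⟩; omega), if_neg (by rintro ⟨h, -⟩; omega)]
    · rw [show j + 1 + m = j + (m + 1) from by omega]

theorem mapCaps_block_nonH (seq : List Char) (k m : Nat) (c : String) (hc : c ≠ "H") :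
    mapCaps seq k (List.replicate m c) (List.replicate m 0) (List.replicate m 0)
      = List.replicate m c := by
  induction m generalizing k with
  | zero => rfl
  | succ m ih =>
    simp only [List.replicate_succ, mapCaps]
    rw [if_neg (by rintro ⟨h, _⟩; exact hc h), ih (k+1)]

-- the run-structure induction tying B's pointwise form to emitB over runs
theorem bridge (seq : List Char) :
    ∀ m (l : List String) (pos : Nat), l.length ≤ m →
      mapCaps seq pos l (preAux 0 l) (sufR l) = emitB seq (groupRunsB l) pos := by
  intro m
  induction m with
  | zero =>
    intro l pos h
    have : l = [] := List.eq_nil_of_length_eq_zero (by omega)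
    subst this; rfl
  | succ m ih =>
    intro l pos hlen
    rcases hl : l with _ | ⟨x, xs⟩
    · rfl
    · rw [← hl]
      set t := l.takeWhile (fun y => y == x) with ht
      set d := l.dropWhile (fun y => y == x) with hd
      set L := t.length with hLdef
      have hsplit : l = t ++ d := (List.takeWhile_append_dropWhile).symm
      have htrep : t = List.replicate L x := by
        apply List.eq_replicate_of_mem
        intro y hy
        have := List.mem_takeWhile_imp hy
        simpa using this
      have hL0 : 0 < L := by
        rw [hLdef, ht, hl]
        simp [List.takeWhile]
      have hdh : d.head? ≠ some x := by
        intro hcontra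
        rcases hdd : d with _ | ⟨z, zs⟩
        · rw [hdd] at hcontra; simp at hcontra
        · have : ¬ (z == x) = true := by
            have := List.head?_dropWhile_not (fun y => y == x) l
            rw [← hd, hdd] at this
            simpa using this
          rw [hdd] at hcontra
          simp at hcontra
          exact this (by simp [hcontra])
      have hdlen : d.length < l.length := by
        have := congrArg List.length hsplit
        simp at this
        omega
      rw [hsplit, htrep]
      -- decompose groupRunsB
      rw [groupRunsB_replicate x L d hL0 hdh]
      by_cases hx : x = "H"
      · subst hx
        -- pre decomposition
        have hpre : preAux 0 (List.replicate L "H" ++ d)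
            = (List.range L).map (fun t => t + 0 + 1) ++ preAux 0 d := by
          rw [preAux_append, preAux_repl_H]
          congr 1
          · congr 1; funext t; omega
          · exact preAux_head_ne _ 0 d hdh
        have hsuf : sufR (List.replicate L "H" ++ d)
            = (List.range L).map (fun t => L - t) ++ sufR d :=
          sufR_append_H L d (sufR_headD_ne d hdh)
        have hblk := mapCaps_block_H seq pos L 0
        rw [Nat.add_zero, Nat.zero_add] at hblk
        rw [hpre, hsuf,
            mapCaps_append seq pos _ _ _ _ _ _ (by simp) (by simp),
            show pos + (List.replicate L "H").length = pos + L from by simp,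
            hblk, ih d (pos + L) (by omega)]
        simp only [emitB]
        congr 1
        by_cases hcnd : 0 < pos ∧ seq.getD (pos - 1) ' ' = 'P' ∧ L < 5
        · rw [if_pos hcnd, if_pos ⟨trivial, hcnd.1, hcnd.2.1, hcnd.2.2⟩]
        · rw [if_neg hcnd, if_neg (by rintro ⟨-, a, b, c⟩; exact hcnd ⟨a, b, c⟩)]
      · -- non-H run
        have hpre : preAux 0 (List.replicate L x ++ d)
            = List.replicate L 0 ++ preAux 0 d := by
          rw [preAux_append, preAux_repl_nonH L 0 x hx]
          congr 1
          have : (List.replicate L (0:Nat)).getLastD 0 = 0 := by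
            rcases hLL : L with _ | L'
            · rfl
            · rw [List.replicate_succ']
              simp
          rw [this]
        have hsuf : sufR (List.replicate L x ++ d)
            = List.replicate L 0 ++ sufR d := sufR_append_nonH L x hx d
        rw [hpre, hsuf,
            mapCaps_append seq pos _ _ _ _ _ _ (by simp) (by simp),
            mapCaps_block_nonH seq pos L x hx,
            show pos + (List.replicate L x).length = pos + L from by simp,
            ih d (pos + L) (by omega)]
        simp only [emitB]
        congr 1
        rw [if_neg (by rintro ⟨h, _⟩; exact hx h)]

-- ===== VERDICT (by name: the statement is the Claim_ definition above) =====
theorem detect_helix_caps_py_spec : Claim_equal_detect_helix_caps_py := by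
  intro sequence ss _ hpre
  unfold Spec_detect_helix_caps_py detect_helix_caps_py detect_helix_caps_py_alt
  rw [goA_eq sequence.toList sequence.toList.length (sequence.toList.length) ss 0 rfl
      (Nat.zero_le _) hpre]
  simp only [List.take_zero, List.nil_append, List.drop_zero, Nat.sub_zero]
  rw [sufR_eq, bridge sequence.toList (ss.take sequence.toList.length).length _ 0 (le_refl _)]
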